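-- pv_equiv track=rewrite | github.com/regantv/universalchess | Alpha6/Alpha7/posTest.py | ReturnCoords
-- ===== SOURCE A (Python) =====
-- def ReturnCoords(square):
--         tick = 0
--         res=[0,0]
--         for x in range(8):
--             for y in range(8):
--                 if tick ==square:
--                     res[1]=x
--                     res[0]=y
--
--                 tick+=1
--
--         return(res)
-- ===== SOURCE B (Python) =====
-- def ReturnCoords(square):
--     # Closed form: tick runs 0..63 with tick = row*8 + col, so invert by divmod.
--     if 0 <= square < 64:
--         return [square % 8, square // 8]
--     return [0, 0]
-- ===== Notes on version B (the rewrite author's own statement) =====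
-- stated objective: simpler
-- what changed: Replaces the nested 8x8 scan with a closed-form divmod computation guarded by an on-board range check; off the board the unchanged default is returned, matching A's never-matching loop.
import Mathlib
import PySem

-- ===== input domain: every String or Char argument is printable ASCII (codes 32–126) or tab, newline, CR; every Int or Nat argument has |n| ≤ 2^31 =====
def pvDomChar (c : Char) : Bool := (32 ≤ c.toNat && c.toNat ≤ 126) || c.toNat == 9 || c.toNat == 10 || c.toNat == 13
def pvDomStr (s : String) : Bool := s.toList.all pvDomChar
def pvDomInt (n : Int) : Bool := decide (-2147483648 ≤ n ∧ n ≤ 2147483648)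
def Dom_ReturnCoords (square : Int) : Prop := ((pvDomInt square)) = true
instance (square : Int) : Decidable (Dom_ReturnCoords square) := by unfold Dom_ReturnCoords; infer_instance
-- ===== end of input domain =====

-- B replaces A's 64-step nested scan by the closed form [square % 8, square // 8]
-- with a range guard (objective: simpler).

-- ===== PORT A =====
-- inner loop 'for y in range(8)': state = (tick, res)
def pvInner (square : Int) (x : Nat) (st : Int × List Int) : Int × List Int :=
  (List.range 8).foldl
    (fun st y =>
      let st' := if st.1 == square then (st.1, [(y : Int), (x : Int)]) else st
      (st'.1 + 1, st'.2)) st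

def ReturnCoords (square : Int) : List Int :=
  ((List.range 8).foldl (fun st x => pvInner square x st) (0, [0, 0])).2

-- ===== PORT B =====
def ReturnCoords_alt (square : Int) : List Int :=
  if 0 ≤ square ∧ square < 64 then
    [PySem.Int.mod square 8, PySem.Int.floordiv square 8]
  else [0, 0]

-- ===== PRECONDITION & SPEC =====
def Spec_ReturnCoords (square : Int) (out : List Int) : Prop := out = ReturnCoords_alt square
instance (square : Int) (out : List Int) : Decidable (Spec_ReturnCoords square out) := by unfold Spec_ReturnCoords; infer_instance

-- ===== CLAIM (what is proved, stated in full; the proofs are below) =====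
def Claim_equal_ReturnCoords : Prop := ∀ (square : Int), Dom_ReturnCoords square → Spec_ReturnCoords square (ReturnCoords square)

-- ===== LEMMAS AND PROOFS =====

-- If the tick never matches square during 8 inner steps, the inner loop only advances tick by 8.
lemma pvInner_skip (square : Int) (x : Nat) (st : Int × List Int)
    (h : ∀ i : Nat, i < 8 → st.1 + (i : Int) ≠ square) :
    pvInner square x st = (st.1 + 8, st.2) := by
  obtain ⟨t, r⟩ := st
  have g0 := h 0 (by norm_num); have g1 := h 1 (by norm_num)
  have g2 := h 2 (by norm_num); have g3 := h 3 (by norm_num)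
  have g4 := h 4 (by norm_num); have g5 := h 5 (by norm_num)
  have g6 := h 6 (by norm_num); have g7 := h 7 (by norm_num)
  simp only at g0 g1 g2 g3 g4 g5 g6 g7
  have n0 : ¬ t = square := by push_cast at g0; omega
  have n1 : ¬ t + 1 = square := by push_cast at g1; omega
  have n2 : ¬ t + 1 + 1 = square := by push_cast at g2; omega
  have n3 : ¬ t + 1 + 1 + 1 = square := by push_cast at g3; omega
  have n4 : ¬ t + 1 + 1 + 1 + 1 = square := by push_cast at g4; omega
  have n5 : ¬ t + 1 + 1 + 1 + 1 + 1 = square := by push_cast at g5; omega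
  have n6 : ¬ t + 1 + 1 + 1 + 1 + 1 + 1 = square := by push_cast at g6; omega
  have n7 : ¬ t + 1 + 1 + 1 + 1 + 1 + 1 + 1 = square := by push_cast at g7; omega
  simp only [pvInner, List.range_succ, List.range_zero, List.foldl_append,
    List.foldl_cons, List.foldl_nil, beq_iff_eq, if_neg n0, if_neg n1, if_neg n2,
    if_neg n3, if_neg n4, if_neg n5, if_neg n6, if_neg n7, Prod.mk.injEq]
  simp only [pvInner, List.range_succ, List.range_zero, List.nil_append,
    List.pure_def, List.bind_eq_flatMap, List.flatMap_append, List.flatMap_cons,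
    List.flatMap_nil, List.append_nil, List.map_append, List.map_cons, List.map_nil,
    List.foldl_append, List.foldl_cons, List.foldl_nil, beq_iff_eq, if_neg n0,
    if_neg n1, if_neg n2, if_neg n3, if_neg n4, if_neg n5, if_neg n6, if_neg n7,
    Prod.mk.injEq]
  exact ⟨by omega, trivial⟩

-- Outside 0..63, A's scan leaves the initial state [0,0] untouched.
lemma ReturnCoords_out (square : Int) (h : square < 0 ∨ 64 ≤ square) :
    ReturnCoords square = [0, 0] := by
  have skip : ∀ (x : Nat) (st : Int × List Int),
      (st.1 ≤ square - 8 ∨ square < st.1) → pvInner square x st = (st.1 + 8, st.2) := by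
    intro x st hst
    exact pvInner_skip square x st (by intro i hi; omega)
  unfold ReturnCoords
  simp only [List.range_succ, List.foldl_append, List.foldl_cons, List.foldl_nil,
    List.range_zero]
  rw [skip 0 _ (by omega), skip 1 _ (by omega), skip 2 _ (by omega), skip 3 _ (by omega),
    skip 4 _ (by omega), skip 5 _ (by omega), skip 6 _ (by omega), skip 7 _ (by omega)]

-- ===== VERDICT (by name: the statement is the Claim_ definition above) =====
set_option maxRecDepth 8000 in
set_option maxHeartbeats 1000000 in
theorem ReturnCoords_spec : Claim_equal_ReturnCoords := by
  intro square _
  unfold Spec_ReturnCoords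
  by_cases h : 0 ≤ square ∧ square < 64
  · obtain ⟨h1, h2⟩ := h
    interval_cases square <;> decide
  · rw [ReturnCoords_out square (by omega), ReturnCoords_alt, if_neg h]
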